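-- pv_equiv track=rewrite | github.com/Adam-Hoelscher/CodeFights.py | troubleFiles.py | troubleFiles
-- ===== SOURCE A (Python) =====
-- from heapq import heappush, heappop, merge
--
-- FILE = 0
--
-- END = 1
--
-- START = 2
--
-- def troubleFiles(files, backups):
--
--     queue_size = 0
--     trouble = {}
--
--     files = ((time, FILE, size) for time, size in sorted(files))
--     backups = ((time, START, None) for time in sorted(backups))
--     queue = list(merge(files, backups))
--     busy = 0
--
--     while queue:
--
--         event_time, event_type, file_size = heappop(queue)
--
--         if event_type == FILE and not busy:
--             queue_size += file_size
--         elif event_type == FILE and busy: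
--             trouble[busy] += 1
--
--         elif event_type == END:
--             busy = 0
--
--         elif event_type == START:
--             trouble[event_time] = 0
--             if queue_size:
--                 busy = event_time
--                 heappush(queue, (event_time + queue_size, END, None))
--                 queue_size = 0
--
--     return list(trouble.values())
-- ===== SOURCE B (Python) =====
-- # Per-backup staged processing: no merged event stream and no event tuples; an
-- # outer loop over the sorted backups consumes the file prefix due by each start,
-- # with pending backup-end times kept as a small ascending list, plus one tail
-- # pass over the files after the last backup.
--
-- def _insort(x, ends):
--     i = 0
--     while i < len(ends) and ends[i] <= x:
--         i += 1
--     return ends[:i] + [x] + ends[i:]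
--
--
-- def troubleFiles(files, backups):
--     fs = sorted(files)
--     bs = sorted(backups)
--     trouble = {}
--     ends = []          # pending backup end times, ascending
--     queue = 0
--     busy = 0           # start time of the running backup; 0 while idle
--     i, n = 0, len(fs)
--     for b in bs:
--         while i < n and fs[i][0] <= b:      # files due before this start (ties included)
--             t, s = fs[i]
--             i += 1
--             while ends and ends[0] < t:     # ends strictly before the file free the machine
--                 ends = ends[1:]
--                 busy = 0
--             if busy:
--                 trouble[busy] += 1
--             else:
--                 queue += s
--         while ends and ends[0] <= b:        # ends up to the start free the machine
--             ends = ends[1:]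
--             busy = 0
--         trouble[b] = 0
--         if queue:
--             busy = b
--             ends = _insort(b + queue, ends)
--             queue = 0
--     for k in range(i, n):                    # files after the last backup
--         t, s = fs[k]
--         while ends and ends[0] < t:
--             ends = ends[1:]
--             busy = 0
--         if busy:
--             trouble[busy] += 1
--         else:
--             queue += s
--     return list(trouble.values())
-- ===== Notes on version B (the rewrite author's own statement) =====
-- stated objective: faster
-- what changed: Replaced the merged event-tuple stream and heapq pop/push simulation by per-backup staged processing: an outer loop over the sorted backups that consumes the file prefix due by each start (freeing the machine on pending end times, kept as a small ascending list), followed by one tail pass over files after the last backup; no event objects, tags or merged ordering exist in B.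
import Mathlib
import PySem

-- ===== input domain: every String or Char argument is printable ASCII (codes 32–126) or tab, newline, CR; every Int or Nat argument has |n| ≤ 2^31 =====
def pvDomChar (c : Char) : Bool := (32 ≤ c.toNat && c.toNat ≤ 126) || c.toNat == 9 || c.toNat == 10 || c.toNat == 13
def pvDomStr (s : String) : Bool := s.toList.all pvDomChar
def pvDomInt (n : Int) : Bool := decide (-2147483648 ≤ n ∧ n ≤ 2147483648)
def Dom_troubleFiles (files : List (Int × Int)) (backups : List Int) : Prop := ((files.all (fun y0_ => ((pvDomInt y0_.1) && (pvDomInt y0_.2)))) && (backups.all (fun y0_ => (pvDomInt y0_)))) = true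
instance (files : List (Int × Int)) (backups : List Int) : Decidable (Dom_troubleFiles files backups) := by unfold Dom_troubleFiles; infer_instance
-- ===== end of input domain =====

-- B replaces A's merged event-tuple stream + heapq simulation by per-backup staged
-- processing (outer loop over sorted backups consuming the file prefix due by each
-- start, pending end times as a small ascending list, one tail pass); measured faster
-- in a timing run (constant factor).


-- ===== PORT A =====
-- An event is a Python tuple (time, type, payload): type 0 = FILE, 1 = END, 2 = START;
-- payload is the file size for FILE events and 0 encodes Python's None (END/START payloads
-- are never compared: the type tags already differ, exactly as in Python's tuple comparison).
def pvEvLe (a b : Int × Int × Int) : Bool :=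
  decide (a.1 < b.1) ||
    (decide (a.1 = b.1) &&
      (decide (a.2.1 < b.2.1) || (decide (a.2.1 = b.2.1) && decide (a.2.2 ≤ b.2.2))))

-- heapq.merge of two sorted event streams (takes from the first stream on ties)
def pvMergeEv : List (Int × Int × Int) → List (Int × Int × Int) → List (Int × Int × Int)
  | [], ys => ys
  | x :: xs, [] => x :: xs
  | x :: xs, y :: ys =>
    if pvEvLe x y then x :: pvMergeEv xs (y :: ys) else y :: pvMergeEv (x :: xs) ys
termination_by xs ys => xs.length + ys.length
decreasing_by all_goals simp

-- the minimum event of e :: l (heapq pops the least tuple)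
def pvMinEv (e : Int × Int × Int) (l : List (Int × Int × Int)) : Int × Int × Int :=
  l.foldl (fun a b => if pvEvLe a b then a else b) e

-- START events (type neither FILE nor END), for the termination measure of the loop
def pvIsStartEv (x : Int × Int × Int) : Bool := !(x.2.1 == 0) && !(x.2.1 == 1)

lemma pvMinEv_mem : ∀ (l : List (Int × Int × Int)) (e), pvMinEv e l ∈ e :: l := by
  intro l
  induction l with
  | nil => intro e; simp [pvMinEv]
  | cons b t ih =>
    intro e
    simp only [pvMinEv, List.foldl_cons]
    by_cases hc : pvEvLe e b = true
    · rw [if_pos hc]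
      have h := ih e
      simp only [pvMinEv] at h
      simp at h ⊢; tauto
    · rw [if_neg hc]
      have h := ih b
      simp only [pvMinEv] at h
      simp at h ⊢; tauto

def pvFEv (p : Int × Int) : Int × Int × Int := (p.1, 0, p.2)
def pvSEv (t : Int) : Int × Int × Int := (t, 2, 0)

-- termination measure facts for the loop (cited by name in decreasing_by)
lemma pvLoopA_dec_erase (e : Int × Int × Int) (rest : List (Int × Int × Int)) :
    ((e :: rest).erase (pvMinEv e rest)).length
        + ((e :: rest).erase (pvMinEv e rest)).countP pvIsStartEv
      < (e :: rest).length + (e :: rest).countP pvIsStartEv := by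
  have hm := pvMinEv_mem rest e
  have hlen : ((e :: rest).erase (pvMinEv e rest)).length = rest.length := by
    rw [List.length_erase]; simp [hm]
  have hcnt : ((e :: rest).erase (pvMinEv e rest)).countP pvIsStartEv
      ≤ (e :: rest).countP pvIsStartEv := by
    rw [List.countP_erase]; omega
  simp only [List.length_cons]
  omega

lemma pvLoopA_dec_start (e : Int × Int × Int) (rest : List (Int × Int × Int)) (qs : Int)
    (h0 : ¬ (pvMinEv e rest).2.1 = 0) (h1 : ¬ (pvMinEv e rest).2.1 = 1) :
    (((pvMinEv e rest).1 + qs, 1, 0) :: (e :: rest).erase (pvMinEv e rest)).length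
        + ((((pvMinEv e rest).1 + qs, 1, 0) :: (e :: rest).erase (pvMinEv e rest)).countP pvIsStartEv)
      < (e :: rest).length + (e :: rest).countP pvIsStartEv := by
  have hm := pvMinEv_mem rest e
  have hst : pvIsStartEv (pvMinEv e rest) = true := by simp [pvIsStartEv]; omega
  have hlen : ((e :: rest).erase (pvMinEv e rest)).length = rest.length := by
    rw [List.length_erase]; simp [hm]
  have hcnt : ((e :: rest).erase (pvMinEv e rest)).countP pvIsStartEv
      = (e :: rest).countP pvIsStartEv - 1 := by
    rw [List.countP_erase]; simp [hm, hst]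
  have hpos : 0 < (e :: rest).countP pvIsStartEv := List.countP_pos_iff.2 ⟨_, hm, hst⟩
  have hf2 : pvIsStartEv ((pvMinEv e rest).1 + qs, 1, 0) = false := by simp [pvIsStartEv]
  have hz : (if false = true then (1 : Nat) else 0) = 0 := rfl
  simp only [List.length_cons, List.countP_cons, hf2, hz] at hcnt hpos ⊢
  omega

-- the while-loop of A: heappop the least event, dispatch on its type;
-- trouble[busy] += 1 is Dict.modify (the key busy is always present when busy ≠ 0)
def troubleFilesLoop (q : List (Int × Int × Int)) (qs busy : Int)
    (tr : PySem.Dict Int Int) : PySem.Dict Int Int :=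
  match q with
  | [] => tr
  | e :: rest =>
    let m := pvMinEv e rest
    let q' := (e :: rest).erase m
    if h0 : m.2.1 = 0 then
      if busy = 0 then troubleFilesLoop q' (qs + m.2.2) busy tr
      else troubleFilesLoop q' qs busy (tr.modify busy 0 (· + 1))
    else if h1 : m.2.1 = 1 then troubleFilesLoop q' qs 0 tr
    else
      if qs ≠ 0 then troubleFilesLoop ((m.1 + qs, 1, 0) :: q') 0 m.1 (tr.insert m.1 0)
      else troubleFilesLoop q' qs busy (tr.insert m.1 0)
termination_by q.length + q.countP pvIsStartEv
decreasing_by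
  · exact pvLoopA_dec_erase e rest
  · exact pvLoopA_dec_erase e rest
  · exact pvLoopA_dec_erase e rest
  · exact pvLoopA_dec_start e rest qs h0 h1
  · exact pvLoopA_dec_erase e rest

def troubleFiles (files : List (Int × Int)) (backups : List Int) : List Int :=
  let fsS := PySem.List.sorted files (fun p => toLex p)   -- sorted(files): lexicographic on pairs
  let bsS := PySem.List.sorted backups (fun t => t)
  let queue := pvMergeEv (fsS.map pvFEv) (bsS.map pvSEv)
  (troubleFilesLoop queue 0 0 PySem.Dict.empty).values

-- ===== PORT B =====
-- _insort in Source B: insertion into an ascending list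
def pvInsort (x : Int) : List Int → List Int
  | [] => [x]
  | y :: ys => if y ≤ x then y :: pvInsort x ys else x :: y :: ys

-- 'while ends and ends[0] < t: ends = ends[1:]; busy = 0'
def pvPopLT (t : Int) : List Int → Int → List Int × Int
  | [], busy => ([], busy)
  | e :: es, busy => if e < t then pvPopLT t es 0 else (e :: es, busy)

-- 'while ends and ends[0] <= b: ends = ends[1:]; busy = 0'
def pvPopLE (b : Int) : List Int → Int → List Int × Int
  | [], busy => ([], busy)
  | e :: es, busy => if e ≤ b then pvPopLE b es 0 else (e :: es, busy)

-- the inner 'while i < n and fs[i][0] <= b' loop: handle all files due by start b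
def pvConsume (b : Int) : List (Int × Int) → List Int → Int → Int → PySem.Dict Int Int →
    List (Int × Int) × List Int × Int × Int × PySem.Dict Int Int
  | [], ends, qs, busy, tr => ([], ends, qs, busy, tr)
  | (t, s) :: fs, ends, qs, busy, tr =>
    if t ≤ b then
      let p := pvPopLT t ends busy
      if p.2 ≠ 0 then pvConsume b fs p.1 qs p.2 (tr.modify p.2 0 (· + 1))
      else pvConsume b fs p.1 (qs + s) p.2 tr
    else ((t, s) :: fs, ends, qs, busy, tr)

-- one iteration of the 'for b in bs' loop
def pvBackupStep (st : List (Int × Int) × List Int × Int × Int × PySem.Dict Int Int)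
    (b : Int) : List (Int × Int) × List Int × Int × Int × PySem.Dict Int Int :=
  let c := pvConsume b st.1 st.2.1 st.2.2.1 st.2.2.2.1 st.2.2.2.2
  let p := pvPopLE b c.2.1 c.2.2.2.1
  let tr' := c.2.2.2.2.insert b 0
  if c.2.2.1 ≠ 0 then (c.1, pvInsort (b + c.2.2.1) p.1, 0, b, tr')
  else (c.1, p.1, c.2.2.1, p.2, tr')

-- the tail 'for k in range(i, n)' loop over the files after the last backup
def pvTail : List (Int × Int) → List Int → Int → Int → PySem.Dict Int Int → PySem.Dict Int Int
  | [], _, _, _, tr => tr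
  | (t, s) :: fs, ends, qs, busy, tr =>
    let p := pvPopLT t ends busy
    if p.2 ≠ 0 then pvTail fs p.1 qs p.2 (tr.modify p.2 0 (· + 1))
    else pvTail fs p.1 (qs + s) p.2 tr

def troubleFiles_alt (files : List (Int × Int)) (backups : List Int) : List Int :=
  let fsS := PySem.List.sorted files (fun p => toLex p)
  let bsS := PySem.List.sorted backups (fun t => t)
  let st := bsS.foldl pvBackupStep (fsS, ([] : List Int), 0, 0, PySem.Dict.empty)
  (pvTail st.1 st.2.1 st.2.2.1 st.2.2.2.1 st.2.2.2.2).values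

-- ===== PRECONDITION & SPEC =====
def Spec_troubleFiles (files : List (Int × Int)) (backups : List Int) (out : List Int) : Prop := out = troubleFiles_alt files backups
instance (files : List (Int × Int)) (backups : List Int) (out : List Int) : Decidable (Spec_troubleFiles files backups out) := by unfold Spec_troubleFiles; infer_instance

-- ===== CLAIM (what is proved, stated in full; the proofs are below) =====
def Claim_equal_troubleFiles : Prop := ∀ (files : List (Int × Int)) (backups : List Int), Dom_troubleFiles files backups → Spec_troubleFiles files backups (troubleFiles files backups)

-- ===== LEMMAS AND PROOFS =====

def pvEEv (t : Int) : Int × Int × Int := (t, 1, 0)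

lemma pvEvLe_iff (a b : Int × Int × Int) :
    pvEvLe a b = true ↔
      (a.1 < b.1 ∨ (a.1 = b.1 ∧ (a.2.1 < b.2.1 ∨ (a.2.1 = b.2.1 ∧ a.2.2 ≤ b.2.2)))) := by
  simp [pvEvLe]

lemma pvEvLe_refl (a : Int × Int × Int) : pvEvLe a a = true := by
  simp [pvEvLe_iff]

lemma pvEvLe_total (a b : Int × Int × Int) (h : ¬ pvEvLe a b = true) : pvEvLe b a = true := by
  rw [pvEvLe_iff] at *; omega

lemma pvEvLe_trans {a b c : Int × Int × Int} (h1 : pvEvLe a b = true)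
    (h2 : pvEvLe b c = true) : pvEvLe a c = true := by
  rw [pvEvLe_iff] at *; omega

lemma pvEvLe_antisymm {a b : Int × Int × Int} (h1 : pvEvLe a b = true)
    (h2 : pvEvLe b a = true) : a = b := by
  rcases a with ⟨a1, a2, a3⟩; rcases b with ⟨b1, b2, b3⟩
  simp only [pvEvLe_iff] at h1 h2
  simp only [Prod.mk.injEq]
  omega

lemma pvMinEv_le : ∀ (l : List (Int × Int × Int)) (e x), x ∈ e :: l → pvEvLe (pvMinEv e l) x = true := by
  intro l
  induction l with
  | nil => intro e x hx; simp at hx; subst hx; exact pvEvLe_refl _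
  | cons b t ih =>
    intro e x hx
    have hstep : pvMinEv e (b :: t) = pvMinEv (if pvEvLe e b then e else b) t := by
      simp [pvMinEv]
    have hhead : pvEvLe (pvMinEv (if pvEvLe e b then e else b) t)
        (if pvEvLe e b then e else b) = true :=
      ih (if pvEvLe e b then e else b) _ List.mem_cons_self
    rw [hstep]
    rcases List.mem_cons.1 hx with h1 | h1
    · subst h1
      by_cases hc : pvEvLe x b = true
      · rw [if_pos hc] at hhead ⊢; exact hhead
      · rw [if_neg hc] at hhead ⊢; exact pvEvLe_trans hhead (pvEvLe_total x b hc)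
    · rcases List.mem_cons.1 h1 with h2 | h2
      · subst h2
        by_cases hc : pvEvLe e x = true
        · rw [if_pos hc] at hhead ⊢; exact pvEvLe_trans hhead hc
        · rw [if_neg hc] at hhead ⊢; exact hhead
      · exact ih _ x (List.mem_cons_of_mem _ h2)

lemma pvMin_unique {q : List (Int × Int × Int)} {m₁ m₂ : Int × Int × Int}
    (h₁ : m₁ ∈ q) (hle₁ : ∀ x ∈ q, pvEvLe m₁ x = true)
    (h₂ : m₂ ∈ q) (hle₂ : ∀ x ∈ q, pvEvLe m₂ x = true) : m₁ = m₂ :=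
  pvEvLe_antisymm (hle₁ m₂ h₂) (hle₂ m₁ h₁)

-- one unfolding step of A's loop, phrased for ANY identified minimum of the queue
lemma troubleFilesLoop_min (q : List (Int × Int × Int)) (m : Int × Int × Int)
    (hm : m ∈ q) (hmin : ∀ x ∈ q, pvEvLe m x = true) (qs busy : Int) (tr : PySem.Dict Int Int) :
    troubleFilesLoop q qs busy tr =
      (if m.2.1 = 0 then
        if busy = 0 then troubleFilesLoop (q.erase m) (qs + m.2.2) busy tr
        else troubleFilesLoop (q.erase m) qs busy (tr.modify busy 0 (· + 1))
      else if m.2.1 = 1 then troubleFilesLoop (q.erase m) qs 0 tr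
      else
        if qs ≠ 0 then troubleFilesLoop ((m.1 + qs, 1, 0) :: q.erase m) 0 m.1 (tr.insert m.1 0)
        else troubleFilesLoop (q.erase m) qs busy (tr.insert m.1 0)) := by
  obtain ⟨e, rest, rfl⟩ : ∃ e rest, q = e :: rest := by
    cases q with
    | nil => simp at hm
    | cons e rest => exact ⟨e, rest, rfl⟩
  have hmval : pvMinEv e rest = m :=
    pvMin_unique (pvMinEv_mem rest e) (pvMinEv_le rest e) hm hmin
  rw [troubleFilesLoop]
  simp only [hmval]
  split_ifs <;> rfl

-- A's loop depends on the queue only through its multiset of events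
lemma troubleFilesLoop_perm : ∀ (n : Nat) (q₁ q₂ : List (Int × Int × Int)) (qs busy : Int)
    (tr : PySem.Dict Int Int), q₁.length + q₁.countP pvIsStartEv ≤ n → q₁.Perm q₂ →
    troubleFilesLoop q₁ qs busy tr = troubleFilesLoop q₂ qs busy tr := by
  intro n
  induction n with
  | zero =>
    intro q₁ q₂ qs busy tr hn hp
    have h1 : q₁ = [] := by cases q₁ <;> simp_all
    subst h1
    have h2 : q₂ = [] := hp.nil_eq.symm
    subst h2; rfl
  | succ n ih =>
    intro q₁ q₂ qs busy tr hn hp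
    cases hq1 : q₁ with
    | nil =>
      subst hq1
      have h2 : q₂ = [] := hp.nil_eq.symm
      subst h2; rfl
    | cons e rest =>
      subst hq1
      set m := pvMinEv e rest with hmdef
      have hm₁ : m ∈ e :: rest := pvMinEv_mem rest e
      have hle₁ : ∀ x ∈ e :: rest, pvEvLe m x = true := pvMinEv_le rest e
      have hm₂ : m ∈ q₂ := hp.mem_iff.1 hm₁
      have hle₂ : ∀ x ∈ q₂, pvEvLe m x = true := fun x hx => hle₁ x (hp.mem_iff.2 hx)
      rw [troubleFilesLoop_min (e :: rest) m hm₁ hle₁,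
          troubleFilesLoop_min q₂ m hm₂ hle₂]
      have hpe : ((e :: rest).erase m).Perm (q₂.erase m) := hp.erase m
      have hlen : ((e :: rest).erase m).length = (e :: rest).length - 1 := by
        simp [hm₁]
      have hcnt : ((e :: rest).erase m).countP pvIsStartEv
          = (e :: rest).countP pvIsStartEv - (if pvIsStartEv m then 1 else 0) := by
        rw [List.countP_erase]
        simp [hm₁]
      have hlc : ((e :: rest).erase m).length + ((e :: rest).erase m).countP pvIsStartEv ≤ n := by
        simp only [List.length_cons] at hn ⊢
        rw [hlen, hcnt]
        simp only [List.length_cons]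
        omega
      split_ifs with h0 hb h1 hq
      · exact ih _ _ _ _ _ hlc hpe
      · exact ih _ _ _ _ _ hlc hpe
      · exact ih _ _ _ _ _ hlc hpe
      · apply ih _ _ _ _ _ _ (hpe.cons _)
        have hst : pvIsStartEv m = true := by simp [pvIsStartEv, h0, h1]
        have hpos : 0 < (e :: rest).countP pvIsStartEv :=
          List.countP_pos_iff.2 ⟨m, hm₁, hst⟩
        have : pvIsStartEv (m.1 + qs, 1, 0) = false := by simp [pvIsStartEv]
        have hz : (if false = true then (1 : Nat) else 0) = 0 := rfl
        simp only [List.length_cons, List.countP_cons, this, hlen, hcnt, hst, if_pos, hz] at *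
        omega
      · exact ih _ _ _ _ _ hlc hpe

lemma pvMergeEv_perm : ∀ (xs ys : List (Int × Int × Int)), (pvMergeEv xs ys).Perm (xs ++ ys) := by
  intro xs ys
  fun_induction pvMergeEv xs ys with
  | case1 ys => simp
  | case2 x xs => simp
  | case3 x xs y ys h ih =>
    simpa using ih.cons x
  | case4 x xs y ys h ih =>
    exact (ih.cons y).trans List.perm_middle.symm

lemma pvInsort_length (x : Int) : ∀ l, (pvInsort x l).length = l.length + 1 := by
  intro l; induction l with
  | nil => rfl
  | cons y ys ih => simp only [pvInsort]; split <;> simp [ih]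

lemma pvInsort_perm (x : Int) : ∀ l, (pvInsort x l).Perm (x :: l) := by
  intro l
  induction l with
  | nil => simp [pvInsort]
  | cons y ys ih =>
    simp only [pvInsort]
    split
    · exact (ih.cons y).trans (List.Perm.swap x y ys)
    · exact List.Perm.refl _

lemma pvInsort_mem {x z : Int} {l : List Int} (h : z ∈ pvInsort x l) : z = x ∨ z ∈ l := by
  have := (pvInsort_perm x l).mem_iff.1 h
  simpa using this

lemma pvInsort_pairwise (x : Int) : ∀ l, l.Pairwise (· ≤ ·) → (pvInsort x l).Pairwise (· ≤ ·) := by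
  intro l
  induction l with
  | nil => intro _; simp [pvInsort]
  | cons y ys ih =>
    intro h
    rcases List.pairwise_cons.1 h with ⟨hy, ht⟩
    simp only [pvInsort]
    split
    · refine List.pairwise_cons.2 ⟨?_, ih ht⟩
      intro z hz
      rcases pvInsort_mem hz with rfl | hz'
      · assumption
      · exact hy z hz'
    · rename_i hyx
      refine List.pairwise_cons.2 ⟨?_, h⟩
      intro z hz
      rcases List.mem_cons.1 hz with rfl | hz'
      · omega
      · exact le_trans (by omega) (hy z hz')

-- proof-side middle loop: the three-way next-event chooser over the same state
-- 'ft is not None and (et is None or ft <= et) and (bt is None or ft <= bt)'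
def pvNextFile (fs : List (Int × Int)) (ends bs : List Int) : Bool :=
  match fs with
  | [] => false
  | (t, _) :: _ =>
    (match ends with | [] => true | e :: _ => decide (t ≤ e)) &&
    (match bs with | [] => true | b :: _ => decide (t ≤ b))

-- 'et is not None and (bt is None or et <= bt)'
def pvNextEnd (ends bs : List Int) : Bool :=
  match ends with
  | [] => false
  | e :: _ => (match bs with | [] => true | b :: _ => decide (e ≤ b))

def pvMidLoop (fs : List (Int × Int)) (bs ends : List Int) (qs busy : Int)
    (tr : PySem.Dict Int Int) : PySem.Dict Int Int :=
  if pvNextFile fs ends bs then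
    match fs with
    | [] => tr
    | (_, s) :: fs' =>
      if busy = 0 then pvMidLoop fs' bs ends (qs + s) busy tr
      else pvMidLoop fs' bs ends qs busy (tr.modify busy 0 (· + 1))
  else if pvNextEnd ends bs then
    match ends with
    | [] => tr
    | _ :: ends' => pvMidLoop fs bs ends' qs 0 tr
  else
    match bs with
    | [] => tr
    | b :: bs' =>
      if qs ≠ 0 then pvMidLoop fs bs' (pvInsort (b + qs) ends) 0 b (tr.insert b 0)
      else pvMidLoop fs bs' ends qs busy (tr.insert b 0)
termination_by fs.length + ends.length + 2 * bs.length
decreasing_by all_goals simp [pvInsort_length] <;> omega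

-- membership in the three-segment queue, reduced to the three constructors
lemma pvQ_min_of (fs : List (Int × Int)) (ends bs : List Int) (m : Int × Int × Int)
    (hf : ∀ p ∈ fs, pvEvLe m (pvFEv p) = true)
    (he : ∀ t ∈ ends, pvEvLe m (pvEEv t) = true)
    (hb : ∀ t ∈ bs, pvEvLe m (pvSEv t) = true) :
    ∀ x ∈ fs.map pvFEv ++ ends.map pvEEv ++ bs.map pvSEv, pvEvLe m x = true := by
  intro x hx
  simp only [List.mem_append, List.mem_map] at hx
  rcases hx with (⟨p, hp, rfl⟩ | ⟨u, hu, rfl⟩) | ⟨u, hu, rfl⟩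
  · exact hf p hp
  · exact he u hu
  · exact hb u hu

lemma pvEEv_not_mem_file (e : Int) (fs : List (Int × Int)) : pvEEv e ∉ fs.map pvFEv := by
  intro hmem
  rcases List.mem_map.1 hmem with ⟨x, _, hx⟩
  have := congrArg (fun y => y.2.1) hx
  simp [pvEEv, pvFEv] at this

lemma pvSEv_not_mem_file (b : Int) (fs : List (Int × Int)) : pvSEv b ∉ fs.map pvFEv := by
  intro hmem
  rcases List.mem_map.1 hmem with ⟨x, _, hx⟩
  have := congrArg (fun y => y.2.1) hx
  simp [pvSEv, pvFEv] at this

lemma pvSEv_not_mem_end (b : Int) (ends : List Int) : pvSEv b ∉ ends.map pvEEv := by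
  intro hmem
  rcases List.mem_map.1 hmem with ⟨x, _, hx⟩
  have := congrArg (fun y => y.2.1) hx
  simp [pvSEv, pvEEv] at this

-- the head of the sorted file list bounds all later file times
lemma pvFile_head_le {t sz : Int} {fs' : List (Int × Int)}
    (h : ((t, sz) :: fs').Pairwise (fun a b => toLex a ≤ toLex b)) :
    ∀ p ∈ (t, sz) :: fs', t ≤ p.1 := by
  intro p hp
  rcases List.mem_cons.1 hp with rfl | hp'
  · simp
  · have := List.rel_of_pairwise_cons h hp'
    rw [Prod.Lex.le_iff] at this
    simp at this
    omega

lemma troubleFilesLoop_nil (qs busy : Int) (tr : PySem.Dict Int Int) :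
    troubleFilesLoop [] qs busy tr = tr := by
  rw [troubleFilesLoop.eq_def]

lemma pvMidLoop_nil (qs busy : Int) (tr : PySem.Dict Int Int) :
    pvMidLoop [] [] [] qs busy tr = tr := by
  rw [pvMidLoop.eq_def]
  simp [pvNextFile, pvNextEnd]

lemma pvMidLoop_file (t sz : Int) (fs' : List (Int × Int)) (bs ends : List Int)
    (qs busy : Int) (tr : PySem.Dict Int Int)
    (hF : pvNextFile ((t, sz) :: fs') ends bs = true) :
    pvMidLoop ((t, sz) :: fs') bs ends qs busy tr =
      if busy = 0 then pvMidLoop fs' bs ends (qs + sz) busy tr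
      else pvMidLoop fs' bs ends qs busy (tr.modify busy 0 (· + 1)) := by
  rw [pvMidLoop.eq_def]
  simp [hF]

lemma pvMidLoop_end (fs : List (Int × Int)) (e : Int) (ends' bs : List Int)
    (qs busy : Int) (tr : PySem.Dict Int Int)
    (hF : pvNextFile fs (e :: ends') bs = false) (hE : pvNextEnd (e :: ends') bs = true) :
    pvMidLoop fs bs (e :: ends') qs busy tr = pvMidLoop fs bs ends' qs 0 tr := by
  rw [pvMidLoop.eq_def]
  simp [hF, hE]

lemma pvMidLoop_start (fs : List (Int × Int)) (ends : List Int) (b : Int)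
    (bs' : List Int) (qs busy : Int) (tr : PySem.Dict Int Int)
    (hF : pvNextFile fs ends (b :: bs') = false) (hE : pvNextEnd ends (b :: bs') = false) :
    pvMidLoop fs (b :: bs') ends qs busy tr =
      if qs ≠ 0 then pvMidLoop fs bs' (pvInsort (b + qs) ends) 0 b (tr.insert b 0)
      else pvMidLoop fs bs' ends qs busy (tr.insert b 0) := by
  rw [pvMidLoop.eq_def]
  simp [hF, hE]

-- the A-side simulation: A's loop on the remaining-event multiset equals the chooser loop
lemma pvSim : ∀ (n : Nat) (fs : List (Int × Int)) (bs ends : List Int) (qs busy : Int)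
    (tr : PySem.Dict Int Int),
    fs.length + ends.length + 2 * bs.length ≤ n →
    fs.Pairwise (fun a b => toLex a ≤ toLex b) →
    ends.Pairwise (· ≤ ·) → bs.Pairwise (· ≤ ·) →
    troubleFilesLoop (fs.map pvFEv ++ ends.map pvEEv ++ bs.map pvSEv) qs busy tr
      = pvMidLoop fs bs ends qs busy tr := by
  intro n
  induction n with
  | zero =>
    intro fs bs ends qs busy tr hn _ _ _
    have h1 : fs = [] := by cases fs <;> simp_all
    have h2 : ends = [] := by cases ends <;> simp_all
    have h3 : bs = [] := by cases bs <;> simp_all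
    subst h1; subst h2; subst h3
    simp only [List.map_nil, List.append_nil]
    rw [troubleFilesLoop_nil, pvMidLoop_nil]
  | succ n ih =>
    intro fs bs ends qs busy tr hn hPf hPe hPb
    by_cases hF : pvNextFile fs ends bs = true
    · -- FILE event next
      obtain ⟨t, sz, fs', rfl⟩ : ∃ t sz fs', fs = (t, sz) :: fs' := by
        cases fs with
        | nil => simp [pvNextFile] at hF
        | cons p fs' => exact ⟨p.1, p.2, fs', by simp⟩
      have hfe : ∀ u ∈ ends, t ≤ u := by
        intro u hu
        cases ends with
        | nil => simp at hu
        | cons e es =>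
          simp only [pvNextFile, Bool.and_eq_true, decide_eq_true_eq] at hF
          rcases List.mem_cons.1 hu with rfl | hu'
          · exact hF.1
          · exact le_trans hF.1 (List.rel_of_pairwise_cons hPe hu')
      have hfb : ∀ u ∈ bs, t ≤ u := by
        intro u hu
        cases bs with
        | nil => simp at hu
        | cons b bs' =>
          simp only [pvNextFile, Bool.and_eq_true, decide_eq_true_eq] at hF
          rcases List.mem_cons.1 hu with rfl | hu'
          · exact hF.2
          · exact le_trans hF.2 (List.rel_of_pairwise_cons hPb hu')
      have hmin : ∀ x ∈ ((t, sz) :: fs').map pvFEv ++ ends.map pvEEv ++ bs.map pvSEv,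
          pvEvLe (pvFEv (t, sz)) x = true := by
        apply pvQ_min_of
        · intro p hp
          have ht := pvFile_head_le hPf p hp
          rcases List.mem_cons.1 hp with rfl | hp'
          · exact pvEvLe_refl _
          · have := List.rel_of_pairwise_cons hPf hp'
            rw [Prod.Lex.le_iff] at this
            simp only [pvEvLe_iff, pvFEv]
            try simp at this ⊢
            omega
        · intro u hu
          have := hfe u hu
          simp only [pvEvLe_iff, pvFEv, pvEEv]
          try simp
          omega
        · intro u hu
          have := hfb u hu
          simp only [pvEvLe_iff, pvFEv, pvSEv]
          try simp
          omega
      have hm : pvFEv (t, sz) ∈ ((t, sz) :: fs').map pvFEv ++ ends.map pvEEv ++ bs.map pvSEv := by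
        simp
      rw [troubleFilesLoop_min _ _ hm hmin]
      have hQe : (((t, sz) :: fs').map pvFEv ++ ends.map pvEEv ++ bs.map pvSEv).erase (pvFEv (t, sz))
          = fs'.map pvFEv ++ ends.map pvEEv ++ bs.map pvSEv := by
        simp only [List.map_cons, List.cons_append, List.erase_cons_head]
      rw [hQe]
      rw [pvMidLoop_file t sz fs' bs ends qs busy tr hF]
      have htag : (pvFEv (t, sz)).2.1 = 0 := rfl
      rw [if_pos htag]
      have hn' : fs'.length + ends.length + 2 * bs.length ≤ n := by
        simp only [List.length_cons] at hn; omega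
      by_cases hb : busy = 0
      · rw [if_pos hb, if_pos hb]
        exact ih fs' bs ends _ _ _ hn' (List.Pairwise.of_cons hPf) hPe hPb
      · rw [if_neg hb, if_neg hb]
        exact ih fs' bs ends _ _ _ hn' (List.Pairwise.of_cons hPf) hPe hPb
    · by_cases hE : pvNextEnd ends bs = true
      · -- END event next
        obtain ⟨e, ends', rfl⟩ : ∃ e ends', ends = e :: ends' := by
          cases ends with
          | nil => simp [pvNextEnd] at hE
          | cons e es => exact ⟨e, es, rfl⟩
        have heb : ∀ u ∈ bs, e ≤ u := by
          intro u hu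
          cases bs with
          | nil => simp at hu
          | cons b bs' =>
            simp only [pvNextEnd, decide_eq_true_eq] at hE
            rcases List.mem_cons.1 hu with rfl | hu'
            · exact hE
            · exact le_trans hE (List.rel_of_pairwise_cons hPb hu')
        have hef : ∀ p ∈ fs, e < p.1 := by
          intro p hp
          cases fs with
          | nil => simp at hp
          | cons q fs'' =>
            obtain ⟨t, sz2⟩ := q
            have ht : t ≤ p.1 := pvFile_head_le hPf p hp
            have het : e < t := by
              cases bs with
              | nil => simp [pvNextFile, pvNextEnd] at hF hE; omega
              | cons b bs' => simp [pvNextFile, pvNextEnd] at hF hE; omega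
            omega
        have hmin : ∀ x ∈ fs.map pvFEv ++ ((e :: ends').map pvEEv) ++ bs.map pvSEv,
            pvEvLe (pvEEv e) x = true := by
          apply pvQ_min_of
          · intro p hp
            have := hef p hp
            simp only [pvEvLe_iff, pvFEv, pvEEv]
            try simp
            omega
          · intro u hu
            have hu' : e ≤ u := by
              rcases List.mem_cons.1 hu with rfl | hu'
              · exact le_refl _
              · exact List.rel_of_pairwise_cons hPe hu'
            simp only [pvEvLe_iff, pvEEv]
            try simp
            omega
          · intro u hu
            have := heb u hu
            simp only [pvEvLe_iff, pvEEv, pvSEv]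
            try simp
            omega
        have hm : pvEEv e ∈ fs.map pvFEv ++ ((e :: ends').map pvEEv) ++ bs.map pvSEv := by
          simp
        rw [troubleFilesLoop_min _ _ hm hmin]
        have hQe : (fs.map pvFEv ++ ((e :: ends').map pvEEv) ++ bs.map pvSEv).erase (pvEEv e)
            = fs.map pvFEv ++ ends'.map pvEEv ++ bs.map pvSEv := by
          rw [List.erase_append_left _ (by simp)]
          rw [List.erase_append_right _ (pvEEv_not_mem_file e fs)]
          simp only [List.map_cons, List.erase_cons_head]
        rw [hQe]
        have htag0 : ¬ (pvEEv e).2.1 = 0 := by simp [pvEEv]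
        have htag1 : (pvEEv e).2.1 = 1 := rfl
        rw [if_neg htag0, if_pos htag1]
        rw [pvMidLoop_end fs e ends' bs qs busy tr (by simpa using hF) hE]
        have hn' : fs.length + ends'.length + 2 * bs.length ≤ n := by
          simp only [List.length_cons] at hn; omega
        exact ih fs bs ends' _ _ _ hn' hPf (List.Pairwise.of_cons hPe) hPb
      · -- START event (or nothing) next
        cases bs with
        | nil =>
          have h2 : ends = [] := by
            cases ends with
            | nil => rfl
            | cons e es => simp [pvNextEnd] at hE
          have h1 : fs = [] := by
            cases fs with
            | nil => rfl
            | cons p fs'' => subst h2; obtain ⟨t, sz⟩ := p; simp [pvNextFile] at hF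
          subst h1; subst h2
          simp only [List.map_nil, List.append_nil]
          rw [troubleFilesLoop_nil, pvMidLoop_nil]
        | cons b bs' =>
          have hbe : ∀ u ∈ ends, b < u := by
            intro u hu
            cases ends with
            | nil => simp at hu
            | cons e es =>
              simp only [pvNextEnd, decide_eq_true_eq] at hE
              have hbu : b < e := by simp at hE; omega
              rcases List.mem_cons.1 hu with rfl | hu'
              · exact hbu
              · exact lt_of_lt_of_le hbu (List.rel_of_pairwise_cons hPe hu')
          have hbf : ∀ p ∈ fs, b < p.1 := by
            intro p hp
            cases fs with
            | nil => simp at hp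
            | cons q fs'' =>
              obtain ⟨t, sz2⟩ := q
              have ht : t ≤ p.1 := pvFile_head_le hPf p hp
              have hbt : b < t := by
                cases ends with
                | nil => simp [pvNextFile] at hF; omega
                | cons e es =>
                  have hbu : b < e := by simp [pvNextEnd] at hE; omega
                  simp [pvNextFile] at hF; omega
              omega
          have hbb : ∀ u ∈ b :: bs', b ≤ u := by
            intro u hu
            rcases List.mem_cons.1 hu with rfl | hu'
            · exact le_refl _
            · exact List.rel_of_pairwise_cons hPb hu'
          have hmin : ∀ x ∈ fs.map pvFEv ++ ends.map pvEEv ++ ((b :: bs').map pvSEv),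
              pvEvLe (pvSEv b) x = true := by
            apply pvQ_min_of
            · intro p hp
              have := hbf p hp
              simp only [pvEvLe_iff, pvFEv, pvSEv]
              simp
              omega
            · intro u hu
              have := hbe u hu
              simp only [pvEvLe_iff, pvEEv, pvSEv]
              simp
              omega
            · intro u hu
              have := hbb u hu
              simp only [pvEvLe_iff, pvSEv]
              simp
              omega
          have hm : pvSEv b ∈ fs.map pvFEv ++ ends.map pvEEv ++ ((b :: bs').map pvSEv) := by
            simp
          rw [troubleFilesLoop_min _ _ hm hmin]
          have hQe : (fs.map pvFEv ++ ends.map pvEEv ++ ((b :: bs').map pvSEv)).erase (pvSEv b)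
              = fs.map pvFEv ++ ends.map pvEEv ++ bs'.map pvSEv := by
            rw [List.erase_append_right _ (by
              simp only [List.mem_append, not_or]
              exact ⟨pvSEv_not_mem_file b fs, pvSEv_not_mem_end b ends⟩)]
            simp only [List.map_cons, List.erase_cons_head]
          rw [hQe]
          have htag0 : ¬ (pvSEv b).2.1 = 0 := by simp [pvSEv]
          have htag1 : ¬ (pvSEv b).2.1 = 1 := by simp [pvSEv]
          rw [if_neg htag0, if_neg htag1]
          rw [pvMidLoop_start fs ends b bs' qs busy tr (by simpa using hF) (by simpa using hE)]
          by_cases hq : qs ≠ 0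
          · rw [if_pos hq, if_pos hq]
            have hperm : (((pvSEv b).1 + qs, 1, 0) ::
                (fs.map pvFEv ++ ends.map pvEEv ++ bs'.map pvSEv)).Perm
                (fs.map pvFEv ++ (pvInsort (b + qs) ends).map pvEEv ++ bs'.map pvSEv) := by
              have h1 : ((pvInsort (b + qs) ends).map pvEEv).Perm
                  (pvEEv (b + qs) :: ends.map pvEEv) := (pvInsort_perm (b + qs) ends).map pvEEv
              have h2 : (fs.map pvFEv ++ (pvInsort (b + qs) ends).map pvEEv ++ bs'.map pvSEv).Perm
                  ((fs.map pvFEv ++ (pvEEv (b + qs) :: ends.map pvEEv)) ++ bs'.map pvSEv) :=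
                ((h1.append_left (fs.map pvFEv)).append (List.Perm.refl _))
              have h3 : ((fs.map pvFEv ++ (pvEEv (b + qs) :: ends.map pvEEv)) ++ bs'.map pvSEv).Perm
                  ((pvEEv (b + qs) :: (fs.map pvFEv ++ ends.map pvEEv)) ++ bs'.map pvSEv) :=
                List.perm_middle.append (List.Perm.refl _)
              have h4 := (h2.trans h3).symm
              simpa [pvSEv, pvEEv] using h4
            rw [troubleFilesLoop_perm ((((pvSEv b).1 + qs, 1, 0) ::
                (fs.map pvFEv ++ ends.map pvEEv ++ bs'.map pvSEv)).length +
                (((pvSEv b).1 + qs, 1, 0) ::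
                (fs.map pvFEv ++ ends.map pvEEv ++ bs'.map pvSEv)).countP pvIsStartEv)
                _ _ _ _ _ (le_refl _) hperm]
            have hn' : fs.length + (pvInsort (b + qs) ends).length + 2 * bs'.length ≤ n := by
              simp only [List.length_cons, pvInsort_length] at hn ⊢; omega
            have := ih fs bs' (pvInsort (b + qs) ends) 0 ((pvSEv b).1)
              (tr.insert (pvSEv b).1 0) hn' hPf (pvInsort_pairwise _ _ hPe)
              (List.Pairwise.of_cons hPb)
            simpa [pvSEv] using this
          · rw [if_neg hq, if_neg hq]
            have hn' : fs.length + ends.length + 2 * bs'.length ≤ n := by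
              simp only [List.length_cons] at hn; omega
            have := ih fs bs' ends qs busy (tr.insert (pvSEv b).1 0) hn' hPf hPe
              (List.Pairwise.of_cons hPb)
            simpa [pvSEv] using this

-- ===== B-side: the grouped loop equals the chooser loop =====

-- B's whole computation from a general intermediate state
def pvRgen (fs : List (Int × Int)) (bs ends : List Int) (qs busy : Int)
    (tr : PySem.Dict Int Int) : PySem.Dict Int Int :=
  let st := bs.foldl pvBackupStep (fs, ends, qs, busy, tr)
  pvTail st.1 st.2.1 st.2.2.1 st.2.2.2.1 st.2.2.2.2

lemma pvRgen_cons (fs : List (Int × Int)) (bs ends : List Int) (qs busy : Int)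
    (tr : PySem.Dict Int Int) (b : Int) :
    pvRgen fs (b :: bs) ends qs busy tr =
      pvRgen (pvBackupStep (fs, ends, qs, busy, tr) b).1 bs
        (pvBackupStep (fs, ends, qs, busy, tr) b).2.1
        (pvBackupStep (fs, ends, qs, busy, tr) b).2.2.1
        (pvBackupStep (fs, ends, qs, busy, tr) b).2.2.2.1
        (pvBackupStep (fs, ends, qs, busy, tr) b).2.2.2.2 := rfl

lemma pvPopLT_ge {t e : Int} (es : List Int) (busy : Int) (h : t ≤ e) :
    pvPopLT t (e :: es) busy = (e :: es, busy) := by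
  rw [pvPopLT, if_neg (by omega)]

lemma pvPopLT_lt {t e : Int} (es : List Int) (busy : Int) (h : e < t) :
    pvPopLT t (e :: es) busy = pvPopLT t es 0 := by
  rw [pvPopLT, if_pos h]

lemma pvPopLE_le {b e : Int} (es : List Int) (busy : Int) (h : e ≤ b) :
    pvPopLE b (e :: es) busy = pvPopLE b es 0 := by
  rw [pvPopLE, if_pos h]

lemma pvPopLE_gt {b e : Int} (es : List Int) (busy : Int) (h : b < e) :
    pvPopLE b (e :: es) busy = (e :: es, busy) := by
  rw [pvPopLE, if_neg (by omega)]

-- FILE step of pvRgen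
lemma pvRgen_file (t s : Int) (fs' : List (Int × Int)) (bs ends : List Int)
    (qs busy : Int) (tr : PySem.Dict Int Int)
    (hF : pvNextFile ((t, s) :: fs') ends bs = true) :
    pvRgen ((t, s) :: fs') bs ends qs busy tr =
      if busy = 0 then pvRgen fs' bs ends (qs + s) busy tr
      else pvRgen fs' bs ends qs busy (tr.modify busy 0 (· + 1)) := by
  have hpop : pvPopLT t ends busy = (ends, busy) := by
    cases ends with
    | nil => rfl
    | cons e es =>
      simp only [pvNextFile, Bool.and_eq_true, decide_eq_true_eq] at hF
      exact pvPopLT_ge es busy hF.1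
  cases bs with
  | nil =>
    show pvTail ((t, s) :: fs') ends qs busy tr = _
    rw [pvTail]
    simp only [hpop]
    by_cases hb : busy = 0
    · rw [if_neg (by simpa using hb), if_pos hb]; rfl
    · rw [if_pos (by simpa using hb), if_neg hb]; rfl
  | cons b bs' =>
    simp only [pvNextFile, Bool.and_eq_true, decide_eq_true_eq] at hF
    have htb : t ≤ b := hF.2
    have hcon : pvConsume b ((t, s) :: fs') ends qs busy tr =
        if busy = 0 then pvConsume b fs' ends (qs + s) busy tr
        else pvConsume b fs' ends qs busy (tr.modify busy 0 (· + 1)) := by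
      rw [pvConsume]
      rw [if_pos htb]
      simp only [hpop]
      by_cases hb : busy = 0
      · rw [if_neg (by simpa using hb), if_pos hb]
      · rw [if_pos (by simpa using hb), if_neg hb]
    by_cases hb : busy = 0
    · rw [if_pos hb] at hcon ⊢
      rw [pvRgen_cons, pvRgen_cons fs']
      simp only [pvBackupStep, hcon]
    · rw [if_neg hb] at hcon ⊢
      rw [pvRgen_cons, pvRgen_cons fs']
      simp only [pvBackupStep, hcon]

-- END step of pvRgen
lemma pvRgen_end (fs : List (Int × Int)) (e : Int) (ends' bs : List Int)
    (qs busy : Int) (tr : PySem.Dict Int Int)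
    (hF : pvNextFile fs (e :: ends') bs = false) (hE : pvNextEnd (e :: ends') bs = true) :
    pvRgen fs bs (e :: ends') qs busy tr = pvRgen fs bs ends' qs 0 tr := by
  cases bs with
  | nil =>
    cases fs with
    | nil => rfl
    | cons p fs2 =>
      obtain ⟨t, s⟩ := p
      have het : e < t := by
        simp only [pvNextFile, Bool.and_eq_true, decide_eq_true_eq] at hF
        simp at hF; omega
      show pvTail ((t, s) :: fs2) (e :: ends') qs busy tr = pvTail ((t, s) :: fs2) ends' qs 0 tr
      rw [pvTail, pvTail]
      simp only [pvPopLT_lt ends' busy het]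
  | cons b bs' =>
    have heb : e ≤ b := by
      simp only [pvNextEnd, decide_eq_true_eq] at hE; exact hE
    rw [pvRgen_cons, pvRgen_cons fs bs' ends']
    have hstep : pvBackupStep (fs, e :: ends', qs, busy, tr) b
        = pvBackupStep (fs, ends', qs, 0, tr) b := by
      have hcon : pvConsume b fs (e :: ends') qs busy tr = pvConsume b fs ends' qs 0 tr ∨
          (pvConsume b fs (e :: ends') qs busy tr = (fs, e :: ends', qs, busy, tr) ∧
           pvConsume b fs ends' qs 0 tr = (fs, ends', qs, 0, tr)) := by
        cases fs with
        | nil => exact Or.inr ⟨rfl, rfl⟩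
        | cons p fs2 =>
          obtain ⟨t, s⟩ := p
          by_cases htb : t ≤ b
          · left
            have het : e < t := by
              simp only [pvNextFile, Bool.and_eq_true, decide_eq_true_eq] at hF
              simp at hF; omega
            rw [pvConsume, pvConsume]
            rw [if_pos htb, if_pos htb]
            simp only [pvPopLT_lt ends' busy het]
          · right
            constructor <;> (rw [pvConsume]; rw [if_neg htb])
      rcases hcon with hcon | ⟨hc1, hc2⟩
      · simp only [pvBackupStep, hcon]
      · simp only [pvBackupStep, hc1, hc2]
        simp only [pvPopLE_le ends' busy heb]
    rw [hstep]

-- START step of pvRgen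
lemma pvRgen_start (fs : List (Int × Int)) (ends : List Int) (b : Int)
    (bs' : List Int) (qs busy : Int) (tr : PySem.Dict Int Int)
    (hF : pvNextFile fs ends (b :: bs') = false) (hE : pvNextEnd ends (b :: bs') = false) :
    pvRgen fs (b :: bs') ends qs busy tr =
      if qs ≠ 0 then pvRgen fs bs' (pvInsort (b + qs) ends) 0 b (tr.insert b 0)
      else pvRgen fs bs' ends qs busy (tr.insert b 0) := by
  have hends : ∀ e es, ends = e :: es → b < e := by
    intro e es he
    subst he
    simp only [pvNextEnd, decide_eq_true_eq] at hE
    simp at hE; omega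
  have hfs : ∀ t s fs2, fs = (t, s) :: fs2 → b < t := by
    intro t s fs2 hf
    subst hf
    cases ends with
    | nil => simp [pvNextFile] at hF; omega
    | cons e es =>
      have hbe := hends e es rfl
      simp [pvNextFile] at hF; omega
  have hcon : pvConsume b fs ends qs busy tr = (fs, ends, qs, busy, tr) := by
    cases fs with
    | nil => rfl
    | cons p fs2 =>
      obtain ⟨t, s⟩ := p
      have := hfs t s fs2 rfl
      rw [pvConsume]; rw [if_neg (by omega)]
  have hple : pvPopLE b ends busy = (ends, busy) := by
    cases ends with
    | nil => rfl
    | cons e es => exact pvPopLE_gt es busy (hends e es rfl)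
  rw [pvRgen_cons]
  simp only [pvBackupStep, hcon, hple]
  by_cases hq : qs ≠ 0
  · rw [if_pos hq, if_pos hq]
  · rw [if_neg hq, if_neg hq]

-- B's grouped loop computes the chooser loop (no sortedness needed)
lemma pvRgen_eq_mid : ∀ (n : Nat) (fs : List (Int × Int)) (bs ends : List Int)
    (qs busy : Int) (tr : PySem.Dict Int Int),
    fs.length + ends.length + 2 * bs.length ≤ n →
    pvRgen fs bs ends qs busy tr = pvMidLoop fs bs ends qs busy tr := by
  intro n
  induction n with
  | zero =>
    intro fs bs ends qs busy tr hn
    have h1 : fs = [] := by cases fs <;> simp_all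
    have h2 : ends = [] := by cases ends <;> simp_all
    have h3 : bs = [] := by cases bs <;> simp_all
    subst h1; subst h2; subst h3
    rw [pvMidLoop_nil]; rfl
  | succ n ih =>
    intro fs bs ends qs busy tr hn
    by_cases hF : pvNextFile fs ends bs = true
    · obtain ⟨t, s, fs', rfl⟩ : ∃ t s fs', fs = (t, s) :: fs' := by
        cases fs with
        | nil => simp [pvNextFile] at hF
        | cons p fs' => exact ⟨p.1, p.2, fs', by simp⟩
      rw [pvRgen_file t s fs' bs ends qs busy tr hF,
          pvMidLoop_file t s fs' bs ends qs busy tr hF]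
      have hn' : fs'.length + ends.length + 2 * bs.length ≤ n := by
        simp only [List.length_cons] at hn; omega
      by_cases hb : busy = 0
      · rw [if_pos hb, if_pos hb]; exact ih fs' bs ends _ _ _ hn'
      · rw [if_neg hb, if_neg hb]; exact ih fs' bs ends _ _ _ hn'
    · by_cases hE : pvNextEnd ends bs = true
      · obtain ⟨e, ends', rfl⟩ : ∃ e ends', ends = e :: ends' := by
          cases ends with
          | nil => simp [pvNextEnd] at hE
          | cons e es => exact ⟨e, es, rfl⟩
        rw [pvRgen_end fs e ends' bs qs busy tr (by simpa using hF) hE,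
            pvMidLoop_end fs e ends' bs qs busy tr (by simpa using hF) hE]
        have hn' : fs.length + ends'.length + 2 * bs.length ≤ n := by
          simp only [List.length_cons] at hn; omega
        exact ih fs bs ends' _ _ _ hn'
      · cases bs with
        | nil =>
          have h2 : ends = [] := by
            cases ends with
            | nil => rfl
            | cons e es => simp [pvNextEnd] at hE
          have h1 : fs = [] := by
            cases fs with
            | nil => rfl
            | cons p fs'' => subst h2; obtain ⟨t, s⟩ := p; simp [pvNextFile] at hF
          subst h1; subst h2
          rw [pvMidLoop_nil]; rfl
        | cons b bs' =>
          rw [pvRgen_start fs ends b bs' qs busy tr (by simpa using hF) (by simpa using hE),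
              pvMidLoop_start fs ends b bs' qs busy tr (by simpa using hF) (by simpa using hE)]
          by_cases hq : qs ≠ 0
          · rw [if_pos hq, if_pos hq]
            have hn' : fs.length + (pvInsort (b + qs) ends).length + 2 * bs'.length ≤ n := by
              simp only [List.length_cons, pvInsort_length] at hn ⊢; omega
            exact ih fs bs' (pvInsort (b + qs) ends) _ _ _ hn'
          · rw [if_neg hq, if_neg hq]
            have hn' : fs.length + ends.length + 2 * bs'.length ≤ n := by
              simp only [List.length_cons] at hn; omega
            exact ih fs bs' ends _ _ _ hn'

-- ===== VERDICT (by name: the statement is the Claim_ definition above) =====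
theorem troubleFiles_spec : Claim_equal_troubleFiles := by
  intro files backups _
  unfold Spec_troubleFiles
  show (troubleFilesLoop
      (pvMergeEv ((PySem.List.sorted files (fun p => toLex p)).map pvFEv)
        ((PySem.List.sorted backups (fun t => t)).map pvSEv)) 0 0 PySem.Dict.empty).values
    = (pvRgen (PySem.List.sorted files (fun p => toLex p))
        (PySem.List.sorted backups (fun t => t)) [] 0 0 PySem.Dict.empty).values
  have hperm : (pvMergeEv ((PySem.List.sorted files (fun p => toLex p)).map pvFEv)
      ((PySem.List.sorted backups (fun t => t)).map pvSEv)).Perm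
      ((PySem.List.sorted files (fun p => toLex p)).map pvFEv
        ++ ([] : List Int).map pvEEv
        ++ (PySem.List.sorted backups (fun t => t)).map pvSEv) := by
    simpa using pvMergeEv_perm ((PySem.List.sorted files (fun p => toLex p)).map pvFEv)
      ((PySem.List.sorted backups (fun t => t)).map pvSEv)
  rw [troubleFilesLoop_perm _ _ _ 0 0 PySem.Dict.empty (le_refl _) hperm]
  rw [pvSim ((PySem.List.sorted files (fun p => toLex p)).length
        + ([] : List Int).length
        + 2 * (PySem.List.sorted backups (fun t => t)).length)
      (PySem.List.sorted files (fun p => toLex p))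
      (PySem.List.sorted backups (fun t => t)) [] 0 0 PySem.Dict.empty
      (le_refl _) (PySem.List.sorted_pairwise files (fun p => toLex p))
      (by simp) (PySem.List.sorted_pairwise backups (fun t => t))]
  rw [pvRgen_eq_mid ((PySem.List.sorted files (fun p => toLex p)).length
        + ([] : List Int).length
        + 2 * (PySem.List.sorted backups (fun t => t)).length)
      (PySem.List.sorted files (fun p => toLex p))
      (PySem.List.sorted backups (fun t => t)) [] 0 0 PySem.Dict.empty
      (le_refl _)]
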